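-- pv_equiv track=rewrite | github.com/viniesposito/aoc-2023 | day15/day15.py | part1
-- ===== SOURCE A (Python) =====
-- def part1(input):
--
--     input = input.strip().split(",")
--
--     def hash(step):
--
--         output = 0
--
--         for char in step:
--             output += ord(char)
--             output *= 17
--             output %= 256
--
--         return output
--
--     return sum(hash(step) for step in input)
-- ===== SOURCE B (Python) =====
-- def part1(input):
--     # Closed form: the per-step hash recurrence h -> (h + ord(c)) * 17 % 256
--     # unrolls to a weighted sum, since 17**k % 256 == 16*k + 1 (mod 256)
--     # (by the binomial theorem, 17**k = (16+1)**k == 1 + 16*k mod 256).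
--     # So hash(step) = sum(ord(c_i) * (16*(L-i) + 1)) % 256, one mod at the end.
--     total = 0
--     for step in input.strip().split(","):
--         L = len(step)
--         total += sum(ord(c) * (16 * (L - i) + 1) for i, c in enumerate(step)) % 256
--     return total
-- ===== Notes on version B (the rewrite author's own statement) =====
-- stated objective: alternative
-- what changed: Replaced the per-step iterative hash recurrence (h -> (h+ord(c))*17 % 256) by its closed form: since 17^k == 16k+1 (mod 256), each step's hash is one weighted sum of ord(c_i)*(16*(L-i)+1) reduced mod 256 once.
import Mathlib
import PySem

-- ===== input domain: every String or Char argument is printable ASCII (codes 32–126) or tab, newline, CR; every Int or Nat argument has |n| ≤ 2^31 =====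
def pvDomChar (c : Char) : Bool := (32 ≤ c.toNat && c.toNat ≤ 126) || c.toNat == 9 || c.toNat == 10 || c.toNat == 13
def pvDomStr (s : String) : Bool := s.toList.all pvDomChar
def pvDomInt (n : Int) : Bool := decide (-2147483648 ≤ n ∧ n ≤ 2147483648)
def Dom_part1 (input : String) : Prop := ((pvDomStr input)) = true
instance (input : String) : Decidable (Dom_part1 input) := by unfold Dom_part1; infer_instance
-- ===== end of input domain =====

-- B replaces the per-step iterative hash recurrence by its closed form: since 17^k ≡ 16k+1 (mod 256),
-- hash(step) is a single weighted sum Σ ord(c_i)·(16·(L−i)+1) reduced mod 256 once (alternative algorithm, same cost).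

-- ===== PORT A =====
-- the nested 'hash' helper of A: a fold over the step's characters
def pvHash (step : List Char) : Int :=
  step.foldl (fun output char => PySem.Int.mod ((output + (char.toNat : Int)) * 17) 256) 0

def part1 (input : String) : Int :=
  ((PySem.Chars.splitOn (PySem.Chars.strip input.toList) [',']).map pvHash).sum

-- ===== PORT B =====
-- Source B's closed-form hash: sum(ord(c) * (16*(L-i) + 1) for i, c in enumerate(step)) % 256
def pvHashB (step : List Char) : Int :=
  PySem.Int.mod
    (((PySem.List.enumerate step).map
        (fun p => (p.2.toNat : Int) * (16 * ((step.length : Int) - p.1) + 1))).sum) 256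

def part1_alt (input : String) : Int :=
  ((PySem.Chars.splitOn (PySem.Chars.strip input.toList) [',']).map pvHashB).sum

-- ===== PRECONDITION & SPEC =====
def Spec_part1 (input : String) (out : Int) : Prop := out = part1_alt input
instance (input : String) (out : Int) : Decidable (Spec_part1 input out) := by unfold Spec_part1; infer_instance

-- ===== CLAIM (what is proved, stated in full; the proofs are below) =====
def Claim_equal_part1 : Prop := ∀ (input : String), Dom_part1 input → Spec_part1 input (part1 input)

-- ===== LEMMAS AND PROOFS =====

-- the enumerate-weighted sum of B, with a free start index s and nominal length L
def pvE (cs : List Char) (s L : Int) : Int :=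
  ((PySem.List.enumerate cs s).map (fun p => (p.2.toNat : Int) * (16 * (L - p.1) + 1))).sum

theorem pvE_cons (c : Char) (rest : List Char) (s L : Int) :
    pvE (c :: rest) s L = (c.toNat : Int) * (16 * (L - s) + 1) + pvE rest (s + 1) L := by
  simp [pvE, PySem.List.enumerate_cons]

-- pulling a mod out of the accumulator does not change the hash fold, and the fold has the closed form
theorem pvFold_closed (cs : List Char) : ∀ (o s L : Int), L - s = cs.length →
    cs.foldl (fun output char => PySem.Int.mod ((output + (char.toNat : Int)) * 17) 256)
        (PySem.Int.mod o 256)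
      = PySem.Int.mod (o * (16 * (L - s) + 1) + pvE cs s L) 256 := by
  induction cs with
  | nil =>
    intro o s L h
    simp only [List.length_nil, Nat.cast_zero] at h
    simp only [List.foldl_nil, pvE, PySem.List.enumerate, List.map_nil, List.sum_nil]
    rw [h]
    ring_nf
  | cons c rest ih =>
    intro o s L h
    have hmods : ∀ x : Int, PySem.Int.mod x 256 = x % 256 := fun x =>
      PySem.Int.mod_eq_emod_of_pos (by norm_num)
    simp only [List.foldl_cons]
    -- replace the reduced accumulator by the unreduced one
    have hme : (o % 256) ≡ o [ZMOD 256] := Int.emod_emod_of_dvd o dvd_rfl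
    have h1 : PySem.Int.mod ((PySem.Int.mod o 256 + (c.toNat : Int)) * 17) 256
        = PySem.Int.mod ((o + (c.toNat : Int)) * 17) 256 := by
      rw [hmods o, hmods, hmods]
      exact (hme.add_right (c.toNat : Int)).mul_right 17
    rw [h1]
    have hlen : L - (s + 1) = (rest.length : Int) := by
      simp only [List.length_cons, Nat.cast_add, Nat.cast_one] at h; omega
    rw [ih ((o + (c.toNat : Int)) * 17) (s + 1) L hlen, pvE_cons]
    rw [hmods, hmods]
    -- the two arguments differ by a multiple of 256
    have key : (o + (c.toNat : Int)) * 17 * (16 * (L - (s + 1)) + 1) + pvE rest (s + 1) L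
        = (o * (16 * (L - s) + 1) + ((c.toNat : Int) * (16 * (L - s) + 1) + pvE rest (s + 1) L))
          + 256 * ((o + (c.toNat : Int)) * (L - s - 1)) := by ring
    rw [key, Int.add_mul_emod_self_left]

theorem pvHash_eq (step : List Char) : pvHash step = pvHashB step := by
  have h0 : (0 : Int) = PySem.Int.mod 0 256 := by
    rw [PySem.Int.mod_eq_emod_of_pos (by norm_num)]; decide
  have := pvFold_closed step 0 0 (step.length : Int) (by simp)
  unfold pvHash pvHashB
  rw [h0, this]
  simp [pvE]

-- ===== VERDICT (by name: the statement is the Claim_ definition above) =====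
theorem part1_spec : Claim_equal_part1 := by
  intro input _
  unfold Spec_part1 part1 part1_alt
  congr 1
  exact List.map_congr_left (fun step _ => pvHash_eq step)
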